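-- pv_equiv track=rewrite | github.com/alanwilter/acpype | amber21-11_os/lib/python3.7/site-packages/pymsmt/mol/getlist.py | get_alist
-- ===== SOURCE A (Python) =====
-- def get_alist(mol, blist):
--     blist = sorted(blist)
--     alist = []
--
--     for i in range(0, len(blist)):
--         ati1 = blist[i][0]
--         ati2 = blist[i][1]
--         for j in range(i+1, len(blist)):
--             atj1 = blist[j][0]
--             atj2 = blist[j][1]
--             if (ati1 == atj1):
--                 at1 = atj2
--                 at2 = ati1
--                 at3 = ati2
--                 angats = (at1, at2, at3)
--                 alist.append(angats)
--             elif (ati1 == atj2):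
--                 at1 = atj1
--                 at2 = ati1
--                 at3 = ati2
--                 angats = (at1, at2, at3)
--                 alist.append(angats)
--             elif (ati2 == atj1):
--                 at1 = ati1
--                 at2 = ati2
--                 at3 = atj2
--                 angats = (at1, at2, at3)
--                 alist.append(angats)
--             elif (ati2 == atj2):
--                 at1 = ati1
--                 at2 = ati2
--                 at3 = atj1
--                 angats = (at1, at2, at3)
--                 alist.append(angats)
--
--     alist = get_pure_type(alist)
--     return alist
--
-- def get_pure_type(onelist):
--     newlist = []
--     for i in onelist:
--         if (not i in newlist) & (not i[::-1] in newlist):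
--             newlist.append(i)
--     return newlist
-- ===== SOURCE B (Python) =====
-- def get_alist(mol, blist):
--     bl = sorted(blist)
--     index = {}
--     for k, (a1, a2) in enumerate(bl):
--         index.setdefault(a1, []).append(k)
--         if a2 != a1:
--             index.setdefault(a2, []).append(k)
--     pairs = set()
--     for ks in index.values():
--         for p in range(len(ks)):
--             for q in range(p + 1, len(ks)):
--                 pairs.add((ks[p], ks[q]))
--     out = []
--     seen = set()
--     for i, j in sorted(pairs):
--         a1, a2 = bl[i]
--         b1, b2 = bl[j]
--         if a1 == b1:
--             t = (b2, a1, a2)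
--         elif a1 == b2:
--             t = (b1, a1, a2)
--         elif a2 == b1:
--             t = (a1, a2, b2)
--         else:
--             t = (a1, a2, b1)
--         if t not in seen:
--             out.append(t)
--             seen.add(t)
--             seen.add(t[::-1])
--     return out
-- ===== Notes on version B (the rewrite author's own statement) =====
-- stated objective: faster
-- what changed: B replaces A's all-pairs double scan over the sorted bond list by an atom-to-bond-indices map (pairing bonds only within each shared atom's index list, collected into a set and sorted), and replaces A's quadratic list-membership dedup of get_pure_type by a single pass with a seen-set holding each kept triple and its reverse.
import Mathlib
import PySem

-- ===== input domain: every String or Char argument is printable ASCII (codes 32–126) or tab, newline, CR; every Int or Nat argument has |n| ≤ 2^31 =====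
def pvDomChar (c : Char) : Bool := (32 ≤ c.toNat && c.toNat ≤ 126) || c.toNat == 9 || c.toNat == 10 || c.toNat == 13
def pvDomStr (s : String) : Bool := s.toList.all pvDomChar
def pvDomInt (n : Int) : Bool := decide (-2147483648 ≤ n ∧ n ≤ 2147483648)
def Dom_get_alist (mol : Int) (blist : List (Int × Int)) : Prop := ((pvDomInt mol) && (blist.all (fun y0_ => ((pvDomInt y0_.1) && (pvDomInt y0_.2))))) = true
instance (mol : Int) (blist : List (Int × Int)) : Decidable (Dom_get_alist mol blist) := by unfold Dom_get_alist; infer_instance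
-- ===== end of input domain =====

-- B replaces A's all-pairs O(n^2) scan by an atom→bond-indices map (pairing bonds only at shared
-- atoms) and A's O(m^2) list-membership dedup by a seen-set; measured faster on the timing inputs.

-- ===== PORT A =====
-- helper of A: get_pure_type
def pvPure (onelist : List (Int × Int × Int)) : List (Int × Int × Int) :=
  onelist.foldl (fun newlist i =>
    if i ∉ newlist ∧ (i.2.2, i.2.1, i.1) ∉ newlist then newlist ++ [i] else newlist) []

def get_alist (mol : Int) (blist : List (Int × Int)) : List (Int × Int × Int) :=
  let bl := PySem.List.sorted2 blist (fun b => b.1) (fun b => b.2) false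
  let alist := (PySem.List.pyRange 0 (PySem.List.len bl) 1).foldl (fun alist i =>
    let ati1 := (PySem.List.pyGetD bl i (0, 0)).1
    let ati2 := (PySem.List.pyGetD bl i (0, 0)).2
    (PySem.List.pyRange (i + 1) (PySem.List.len bl) 1).foldl (fun alist j =>
      let atj1 := (PySem.List.pyGetD bl j (0, 0)).1
      let atj2 := (PySem.List.pyGetD bl j (0, 0)).2
      if ati1 = atj1 then alist ++ [(atj2, ati1, ati2)]
      else if ati1 = atj2 then alist ++ [(atj1, ati1, ati2)]
      else if ati2 = atj1 then alist ++ [(ati1, ati2, atj2)]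
      else if ati2 = atj2 then alist ++ [(ati1, ati2, atj1)]
      else alist) alist) []
  pvPure alist

-- ===== PORT B =====
def get_alist_alt (mol : Int) (blist : List (Int × Int)) : List (Int × Int × Int) :=
  let bl := PySem.List.sorted2 blist (fun b => b.1) (fun b => b.2) false
  -- index: atom -> ascending list of indices of the bonds containing it
  let index : PySem.Dict Int (List Int) := bl.zipIdx.foldl (fun d kb =>
      let d1 := d.modify kb.1.1 [] (fun l => l ++ [(kb.2 : Int)])
      if kb.1.2 ≠ kb.1.1 then d1.modify kb.1.2 [] (fun l => l ++ [(kb.2 : Int)]) else d1)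
    PySem.Dict.empty
  -- pairs: set of (i, j), i < j, of bond indices sharing an atom
  let pairs : PySem.Set (Int × Int) := index.values.foldl (fun s ks =>
      (PySem.List.pyRange 0 (PySem.List.len ks) 1).foldl (fun s p =>
        (PySem.List.pyRange (p + 1) (PySem.List.len ks) 1).foldl (fun s q =>
          PySem.Set.add s (PySem.List.pyGetD ks p 0, PySem.List.pyGetD ks q 0)) s) s)
    PySem.Set.empty
  let st := (PySem.List.sorted2 pairs (fun p => p.1) (fun p => p.2) false).foldl
    (fun st pr =>
      let bi := PySem.List.pyGetD bl pr.1 (0, 0)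
      let bj := PySem.List.pyGetD bl pr.2 (0, 0)
      let t : Int × Int × Int :=
        if bi.1 = bj.1 then (bj.2, bi.1, bi.2)
        else if bi.1 = bj.2 then (bj.1, bi.1, bi.2)
        else if bi.2 = bj.1 then (bi.1, bi.2, bj.2)
        else (bi.1, bi.2, bj.1)
      if t ∈ st.2 then st
      else (st.1 ++ [t], PySem.Set.add (PySem.Set.add st.2 t) (t.2.2, t.2.1, t.1)))
    (([] : List (Int × Int × Int)), (PySem.Set.empty : PySem.Set (Int × Int × Int)))
  st.1

-- ===== PRECONDITION & SPEC =====
def Spec_get_alist (mol : Int) (blist : List (Int × Int)) (out : List (Int × Int × Int)) : Prop := out = get_alist_alt mol blist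
instance (mol : Int) (blist : List (Int × Int)) (out : List (Int × Int × Int)) : Decidable (Spec_get_alist mol blist out) := by unfold Spec_get_alist; infer_instance

-- ===== CLAIM (what is proved, stated in full; the proofs are below) =====
def Claim_equal_get_alist : Prop := ∀ (mol : Int) (blist : List (Int × Int)), Dom_get_alist mol blist → Spec_get_alist mol blist (get_alist mol blist)

-- ===== LEMMAS AND PROOFS =====

-- proof-side vocabulary
def pvLexLe (a b : Int × Int) : Prop := a.1 < b.1 ∨ (a.1 = b.1 ∧ a.2 ≤ b.2)
def pvLexLt (a b : Int × Int) : Prop := a.1 < b.1 ∨ (a.1 = b.1 ∧ a.2 < b.2)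
def pvBefore (a b : Int × Int) : Bool :=
  decide (a.1 < b.1) || (!decide (b.1 < a.1) && decide (a.2 < b.2))
def pvHas (bl : List (Int × Int)) (x : Int) (k : Nat) : Bool :=
  ((bl.getD k (0, 0)).1 == x) || ((bl.getD k (0, 0)).2 == x)
def pvOcc (bl : List (Int × Int)) (x : Int) : List Int :=
  ((List.range bl.length).filter (pvHas bl x)).map (fun k => Int.ofNat k)
def pvShare (bl : List (Int × Int)) (i j : Int) : Bool :=
  let bi := PySem.List.pyGetD bl i (0, 0)
  let bj := PySem.List.pyGetD bl j (0, 0)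
  (bi.1 == bj.1) || (bi.1 == bj.2) || (bi.2 == bj.1) || (bi.2 == bj.2)
def pvT (bi bj : Int × Int) : Int × Int × Int :=
  if bi.1 = bj.1 then (bj.2, bi.1, bi.2)
  else if bi.1 = bj.2 then (bj.1, bi.1, bi.2)
  else if bi.2 = bj.1 then (bi.1, bi.2, bj.2)
  else (bi.1, bi.2, bj.1)
def pvLP (bl : List (Int × Int)) : List (Int × Int) :=
  (PySem.List.pyRange 0 bl.length 1).flatMap (fun i =>
    ((PySem.List.pyRange (i + 1) bl.length 1).filter (fun j => pvShare bl i j)).map (fun j => (i, j)))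
def pvTf (bl : List (Int × Int)) (pr : Int × Int) : Int × Int × Int :=
  pvT (PySem.List.pyGetD bl pr.1 (0, 0)) (PySem.List.pyGetD bl pr.2 (0, 0))

-- A's nested loop produces exactly the triples of the lexicographic sharing pairs
theorem pv_A_char (bl : List (Int × Int)) :
    (PySem.List.pyRange 0 (PySem.List.len bl) 1).foldl (fun alist i =>
      let ati1 := (PySem.List.pyGetD bl i (0, 0)).1
      let ati2 := (PySem.List.pyGetD bl i (0, 0)).2
      (PySem.List.pyRange (i + 1) (PySem.List.len bl) 1).foldl (fun alist j =>
        let atj1 := (PySem.List.pyGetD bl j (0, 0)).1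
        let atj2 := (PySem.List.pyGetD bl j (0, 0)).2
        if ati1 = atj1 then alist ++ [(atj2, ati1, ati2)]
        else if ati1 = atj2 then alist ++ [(atj1, ati1, ati2)]
        else if ati2 = atj1 then alist ++ [(ati1, ati2, atj2)]
        else if ati2 = atj2 then alist ++ [(ati1, ati2, atj1)]
        else alist) alist) []
    = (pvLP bl).map (pvTf bl) := by
  simp only [PySem.List.len_eq]
  have hinner : ∀ i ∈ PySem.List.pyRange 0 (bl.length : Int) 1, ∀ acc : List (Int × Int × Int),
      (PySem.List.pyRange (i + 1) (bl.length : Int) 1).foldl (fun alist j =>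
        let atj1 := (PySem.List.pyGetD bl j (0, 0)).1
        let atj2 := (PySem.List.pyGetD bl j (0, 0)).2
        if (PySem.List.pyGetD bl i (0, 0)).1 = atj1 then alist ++ [(atj2, (PySem.List.pyGetD bl i (0, 0)).1, (PySem.List.pyGetD bl i (0, 0)).2)]
        else if (PySem.List.pyGetD bl i (0, 0)).1 = atj2 then alist ++ [(atj1, (PySem.List.pyGetD bl i (0, 0)).1, (PySem.List.pyGetD bl i (0, 0)).2)]
        else if (PySem.List.pyGetD bl i (0, 0)).2 = atj1 then alist ++ [((PySem.List.pyGetD bl i (0, 0)).1, (PySem.List.pyGetD bl i (0, 0)).2, atj2)]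
        else if (PySem.List.pyGetD bl i (0, 0)).2 = atj2 then alist ++ [((PySem.List.pyGetD bl i (0, 0)).1, (PySem.List.pyGetD bl i (0, 0)).2, atj1)]
        else alist) acc
      = acc ++ (((PySem.List.pyRange (i + 1) (bl.length : Int) 1).filter (fun j => pvShare bl i j)).map (fun j => pvTf bl (i, j))) := by
    intro i _ acc
    rw [PySem.List.foldl_congr_mem' _ _
        (fun alist j => if pvShare bl i j then alist ++ [pvTf bl (i, j)] else alist) acc ?_]
    · exact PySem.List.foldl_append_if (fun j => pvShare bl i j) (fun j => pvTf bl (i, j)) _ acc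
    · intro j _ alist
      simp only [pvShare, pvTf, pvT, Bool.or_eq_true, beq_iff_eq, decide_eq_true_eq]
      split_ifs <;> simp_all
  rw [PySem.List.foldl_congr_mem' _ _
      (fun acc i => acc ++ (((PySem.List.pyRange (i + 1) (bl.length : Int) 1).filter (fun j => pvShare bl i j)).map (fun j => pvTf bl (i, j)))) []
      (fun i hi acc => hinner i hi acc)]
  rw [PySem.List.foldl_append_eq_flatMap]
  simp [pvLP, List.map_flatMap, List.map_map, Function.comp_def]

-- the seen-set dedup loop computes get_pure_type's result
theorem pv_dedup (ts : List (Int × Int × Int)) (out : List (Int × Int × Int))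
    (seen : PySem.Set (Int × Int × Int))
    (hinv : ∀ y : Int × Int × Int, y ∈ seen ↔ y ∈ out ∨ (y.2.2, y.2.1, y.1) ∈ out) :
    ts.foldl (fun newlist i =>
      if i ∉ newlist ∧ (i.2.2, i.2.1, i.1) ∉ newlist then newlist ++ [i] else newlist) out
    = (ts.foldl (fun st t =>
        if t ∈ st.2 then st
        else (st.1 ++ [t], PySem.Set.add (PySem.Set.add st.2 t) (t.2.2, t.2.1, t.1)))
      (out, seen)).1 := by
  induction ts generalizing out seen with
  | nil => rfl
  | cons t ts ih =>
    simp only [List.foldl_cons]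
    by_cases hmem : t ∈ seen
    · rw [if_neg (by rcases (hinv t).1 hmem with h | h <;> tauto), if_pos hmem]
      exact ih out seen hinv
    · rw [if_pos ⟨fun h => hmem ((hinv t).2 (Or.inl h)), fun h => hmem ((hinv t).2 (Or.inr h))⟩,
        if_neg hmem]
    -- re-establish the invariant for the extended list and seen-set
      apply ih
      intro y
      obtain ⟨a, b, c⟩ := y
      obtain ⟨d, e, f⟩ := t
      simp only [PySem.Set.mem_add, hinv (a, b, c), List.mem_append, List.mem_singleton,
        Prod.mk.injEq]
      constructor
      · rintro ((h | h) | ⟨h1, h2, h3⟩ | ⟨h1, h2, h3⟩) <;> tauto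
      · rintro ((h | ⟨h1, h2, h3⟩) | h | ⟨h1, h2, h3⟩) <;> tauto


-- the dict build: lookup of any atom yields exactly the (ascending) indices of bonds containing it
theorem pv_build (L : List ((Int × Int) × Nat)) (d : PySem.Dict Int (List Int)) (x : Int) :
    (L.foldl (fun d kb =>
        let d1 := d.modify kb.1.1 [] (fun l => l ++ [(kb.2 : Int)])
        if kb.1.2 ≠ kb.1.1 then d1.modify kb.1.2 [] (fun l => l ++ [(kb.2 : Int)]) else d1) d).getD x []
    = d.getD x [] ++ (L.filter (fun kb => (kb.1.1 == x) || (kb.1.2 == x))).map (fun kb => ((kb.2 : Int))) := by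
  induction L generalizing d with
  | nil => simp
  | cons kb L ih =>
    simp only [List.foldl_cons, List.filter_cons]
    rw [ih]
    by_cases hne : kb.1.2 ≠ kb.1.1
    · simp only [if_pos hne, PySem.Dict.getD_modify]
      rcases eq_or_ne x kb.1.1 with h1 | h1
      · subst h1
        simp [Ne.symm hne, beq_iff_eq, List.append_assoc]
      · rcases eq_or_ne x kb.1.2 with h2 | h2
        · subst h2
          simp [h1, beq_iff_eq, List.append_assoc]
        · simp [h1, h2, Ne.symm h1, Ne.symm h2, beq_iff_eq]
    · simp only [if_neg hne, PySem.Dict.getD_modify]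
      have heq : kb.1.2 = kb.1.1 := not_not.1 (fun h => hne h)
      rcases eq_or_ne x kb.1.1 with h1 | h1
      · subst h1
        simp [beq_iff_eq, heq, List.append_assoc]
      · simp only [beq_iff_eq, heq, Bool.or_self, if_neg (Ne.symm h1)]
        have : (kb.1.1 == x) = false := by simp [beq_iff_eq]; exact fun h => h1 h.symm
        simp [this, heq]
        exact fun h => absurd h h1

theorem pv_zipIdx (bl : List (Int × Int)) : ∀ k0 : Nat,
    bl.zipIdx k0 = (List.range bl.length).map (fun k => (bl.getD k (0, 0), k0 + k)) := by
  induction bl with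
  | nil => intro k0; simp
  | cons b t ih =>
    intro k0
    rw [List.zipIdx_cons, ih (k0 + 1)]
    simp only [List.length_cons, List.range_succ_eq_map, List.map_cons, List.map_map,
      Function.comp_def, List.getD_cons_zero, Nat.add_zero]
    refine congrArg₂ _ rfl (List.map_congr_left ?_)
    intro k _
    simp only [Nat.succ_eq_add_one, List.getD_cons_succ, Prod.mk.injEq]
    exact ⟨trivial, by omega⟩

theorem pv_getD_occ (bl : List (Int × Int)) (x : Int) :
    (bl.zipIdx.foldl (fun d kb =>
        let d1 := d.modify kb.1.1 [] (fun l => l ++ [(kb.2 : Int)])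
        if kb.1.2 ≠ kb.1.1 then d1.modify kb.1.2 [] (fun l => l ++ [(kb.2 : Int)]) else d1)
      PySem.Dict.empty).getD x []
    = pvOcc bl x := by
  rw [pv_build, pv_zipIdx bl 0]
  simp only [PySem.Dict.getD_empty, List.nil_append, List.filter_map, List.map_map,
    Function.comp_def, Nat.zero_add]
  rfl

theorem pv_nodup_keys (L : List ((Int × Int) × Nat)) (d : PySem.Dict Int (List Int))
    (h : d.keys.Nodup) :
    (L.foldl (fun d kb =>
        let d1 := d.modify kb.1.1 [] (fun l => l ++ [(kb.2 : Int)])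
        if kb.1.2 ≠ kb.1.1 then d1.modify kb.1.2 [] (fun l => l ++ [(kb.2 : Int)]) else d1) d).keys.Nodup := by
  induction L generalizing d with
  | nil => exact h
  | cons kb L ih =>
    simp only [List.foldl_cons]
    apply ih
    have h1 : ((d.modify kb.1.1 [] (fun l => l ++ [(kb.2 : Int)])).keys).Nodup := by
      rw [PySem.Dict.keys_modify]; exact PySem.Dict.nodup_keys_insert _ _ _ h
    by_cases hne : kb.1.2 ≠ kb.1.1
    · simp only [if_pos hne]
      rw [PySem.Dict.keys_modify]; exact PySem.Dict.nodup_keys_insert _ _ _ h1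
    · simpa only [if_neg hne] using h1

theorem pv_mem_inner (f : Int → Int → Int × Int) (m : Int) (l : List Int)
    (s : PySem.Set (Int × Int)) (y : Int × Int) :
    (y ∈ l.foldl (fun s p => (PySem.List.pyRange (p + 1) m 1).foldl
        (fun s q => PySem.Set.add s (f p q)) s) s)
    ↔ y ∈ s ∨ ∃ p ∈ l, ∃ q ∈ PySem.List.pyRange (p + 1) m 1, y = f p q := by
  induction l generalizing s with
  | nil => simp
  | cons p l ih =>
    simp only [List.foldl_cons, ih, PySem.Set.mem_foldl_add, List.mem_cons]
    constructor
    · rintro ((h | ⟨q, hq, rfl⟩) | ⟨p', hp', q, hq, rfl⟩)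
      · exact Or.inl h
      · exact Or.inr ⟨p, Or.inl rfl, q, hq, rfl⟩
      · exact Or.inr ⟨p', Or.inr hp', q, hq, rfl⟩
    · rintro (h | ⟨p', (rfl | hp'), q, hq, rfl⟩)
      · exact Or.inl (Or.inl h)
      · exact Or.inl (Or.inr ⟨q, hq, rfl⟩)
      · exact Or.inr ⟨p', hp', q, hq, rfl⟩

theorem pv_mem_pairs (vals : List (List Int)) (s : PySem.Set (Int × Int)) (y : Int × Int) :
    (y ∈ vals.foldl (fun s ks =>
        (PySem.List.pyRange 0 (PySem.List.len ks) 1).foldl (fun s p =>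
          (PySem.List.pyRange (p + 1) (PySem.List.len ks) 1).foldl (fun s q =>
            PySem.Set.add s (PySem.List.pyGetD ks p 0, PySem.List.pyGetD ks q 0)) s) s) s)
    ↔ y ∈ s ∨ ∃ ks ∈ vals, ∃ p ∈ PySem.List.pyRange 0 (PySem.List.len ks) 1,
        ∃ q ∈ PySem.List.pyRange (p + 1) (PySem.List.len ks) 1,
          y = (PySem.List.pyGetD ks p 0, PySem.List.pyGetD ks q 0) := by
  induction vals generalizing s with
  | nil => simp
  | cons ks vals ih =>
    simp only [List.foldl_cons, ih, pv_mem_inner, List.mem_cons]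
    constructor
    · rintro ((h | h) | ⟨ks', hks', h⟩)
      · exact Or.inl h
      · exact Or.inr ⟨ks, Or.inl rfl, h⟩
      · exact Or.inr ⟨ks', Or.inr hks', h⟩
    · rintro (h | ⟨ks', (rfl | hks'), h⟩)
      · exact Or.inl (Or.inl h)
      · exact Or.inl (Or.inr h)
      · exact Or.inr ⟨ks', hks', h⟩

theorem pv_foldl_pres {σ β : Type} (P : σ → Prop) (f : σ → β → σ)
    (h : ∀ s b, P s → P (f s b)) :
    ∀ (l : List β) (s : σ), P s → P (l.foldl f s) := by
  intro l
  induction l with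
  | nil => exact fun s hs => hs
  | cons b l ih => exact fun s hs => ih _ (h s b hs)

theorem pv_before_iff (a b : Int × Int) :
    pvBefore a b = true ↔ (a.1 < b.1 ∨ (¬ b.1 < a.1 ∧ a.2 < b.2)) := by
  simp [pvBefore]

theorem pv_pairwise_insertBy (x : Int × Int) (acc : List (Int × Int))
    (h : acc.Pairwise pvLexLe) :
    (PySem.List.insertBy pvBefore x acc).Pairwise pvLexLe := by
  induction acc with
  | nil => simp [show PySem.List.insertBy pvBefore x [] = [x] from rfl]
  | cons y ys ih =>
    rw [show PySem.List.insertBy pvBefore x (y :: ys)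
        = if pvBefore x y then x :: y :: ys else y :: PySem.List.insertBy pvBefore x ys from rfl]
    rcases List.pairwise_cons.1 h with ⟨hy, hys⟩
    by_cases hb : pvBefore x y = true
    · rw [if_pos hb]
      refine List.pairwise_cons.2 ⟨?_, h⟩
      intro z hz
      rcases List.mem_cons.1 hz with rfl | hz
      · rw [pv_before_iff] at hb
        simp only [pvLexLe]; omega
      · have h1 := hy z hz
        rw [pv_before_iff] at hb
        simp only [pvLexLe] at h1 ⊢; omega
    · rw [if_neg hb]
      refine List.pairwise_cons.2 ⟨?_, ih hys⟩
      intro z hz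
      rcases (PySem.List.mem_insertBy _ _ _ _).1 hz with rfl | hz
      · have hbf : pvBefore z y = false := by
          cases hpv : pvBefore z y with
          | false => rfl
          | true => exact absurd hpv hb
        have hb2 : ¬ (z.1 < y.1 ∨ (¬ y.1 < z.1 ∧ z.2 < y.2)) := by
          rw [← pv_before_iff, hbf]; simp
        simp only [pvLexLe]; omega
      · exact hy z hz

theorem pv_sorted2_pairwise (xs : List (Int × Int)) :
    (PySem.List.sorted2 xs (fun p => p.1) (fun p => p.2) false).Pairwise pvLexLe := by
  rw [show PySem.List.sorted2 xs (fun p => p.1) (fun p => p.2) false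
      = xs.foldl (fun acc x => PySem.List.insertBy pvBefore x acc) [] from rfl]
  exact pv_foldl_pres (fun l => l.Pairwise pvLexLe) _
    (fun acc x hacc => pv_pairwise_insertBy x acc hacc) xs [] (List.Pairwise.nil)

-- any strictly lex-increasing rearrangement of xs IS sorted(xs)
theorem pv_sorted2_eq (xs ys : List (Int × Int)) (hperm : ys.Perm xs)
    (hpw : ys.Pairwise pvLexLt) :
    PySem.List.sorted2 xs (fun p => p.1) (fun p => p.2) false = ys := by
  refine List.Perm.eq_of_pairwise (le := pvLexLe) ?_ (pv_sorted2_pairwise xs)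
    (hpw.imp ?_) (((PySem.List.sorted2_perm xs _ _ false).trans hperm.symm))
  · rintro ⟨a1, a2⟩ ⟨b1, b2⟩ _ _ hab hba
    simp only [pvLexLe] at hab hba
    simp only [Prod.mk.injEq]
    omega
  · rintro ⟨a1, a2⟩ ⟨b1, b2⟩ h
    simp only [pvLexLt] at h
    simp only [pvLexLe]
    omega

theorem pv_occ_pairwise (bl : List (Int × Int)) (x : Int) :
    (pvOcc bl x).Pairwise (· < ·) := by
  unfold pvOcc
  apply List.Pairwise.map _ (fun (a b : Nat) (h : a < b) => Int.ofNat_lt.2 h)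
  exact List.Pairwise.filter _ List.pairwise_lt_range

theorem pv_mem_occ (bl : List (Int × Int)) (x : Int) (i : Int) :
    i ∈ pvOcc bl x ↔ ∃ k : Nat, k < bl.length ∧ pvHas bl x k = true ∧ i = (k : Int) := by
  simp only [pvOcc, List.mem_map, List.mem_filter, List.mem_range]
  constructor
  · rintro ⟨k, ⟨hk, hh⟩, rfl⟩; exact ⟨k, hk, hh, rfl⟩
  · rintro ⟨k, hk, hh, rfl⟩; exact ⟨k, ⟨hk, hh⟩, rfl⟩

theorem pv_mem_LP (bl : List (Int × Int)) (i j : Int) :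
    (i, j) ∈ pvLP bl ↔ 0 ≤ i ∧ i < j ∧ j < (bl.length : Int) ∧ pvShare bl i j = true := by
  simp only [pvLP, List.mem_flatMap, List.mem_map, List.mem_filter,
    PySem.List.mem_pyRange_one]
  constructor
  · rintro ⟨i', ⟨hi0, hin⟩, j', ⟨⟨hj1, hj2⟩, hs⟩, hij⟩
    obtain ⟨rfl, rfl⟩ : i' = i ∧ j' = j := by
      exact ⟨congrArg Prod.fst hij, congrArg Prod.snd hij⟩
    exact ⟨hi0, by omega, hj2, hs⟩
  · rintro ⟨hi0, hij, hjn, hs⟩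
    exact ⟨i, ⟨hi0, by omega⟩, j, ⟨⟨by omega, hjn⟩, hs⟩, rfl⟩

theorem pv_LP_pairwise (bl : List (Int × Int)) : (pvLP bl).Pairwise pvLexLt := by
  rw [pvLP, List.pairwise_flatMap]
  constructor
  · intro i _
    apply List.Pairwise.map _ (fun (a b : Int) (h : a < b) =>
      show pvLexLt (i, a) (i, b) from Or.inr ⟨rfl, h⟩)
    exact List.Pairwise.filter _ (PySem.List.pairwise_lt_pyRange_one _ _)
  · refine (PySem.List.pairwise_lt_pyRange_one 0 (bl.length : Int)).imp ?_
    intro a b hab x hx y hy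
    rcases List.mem_map.1 hx with ⟨j1, _, rfl⟩
    rcases List.mem_map.1 hy with ⟨j2, _, rfl⟩
    exact Or.inl hab

theorem pv_LP_nodup (bl : List (Int × Int)) : (pvLP bl).Nodup :=
  (pv_LP_pairwise bl).imp (fun {a b} h => by
    rintro rfl
    simp only [pvLexLt] at h
    omega)

-- B's sorted pair set is exactly the lexicographic list of sharing pairs
theorem pv_B_pairs (bl : List (Int × Int)) :
    PySem.List.sorted2
      (PySem.Dict.values (bl.zipIdx.foldl (fun d kb =>
          let d1 := d.modify kb.1.1 [] (fun l => l ++ [(kb.2 : Int)])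
          if kb.1.2 ≠ kb.1.1 then d1.modify kb.1.2 [] (fun l => l ++ [(kb.2 : Int)]) else d1)
        PySem.Dict.empty) |>.foldl (fun s ks =>
        (PySem.List.pyRange 0 (PySem.List.len ks) 1).foldl (fun s p =>
          (PySem.List.pyRange (p + 1) (PySem.List.len ks) 1).foldl (fun s q =>
            PySem.Set.add s (PySem.List.pyGetD ks p 0, PySem.List.pyGetD ks q 0)) s) s)
        PySem.Set.empty)
      (fun p => p.1) (fun p => p.2) false
    = pvLP bl := by
  set idx : PySem.Dict Int (List Int) := bl.zipIdx.foldl (fun d kb =>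
      let d1 := d.modify kb.1.1 [] (fun l => l ++ [(kb.2 : Int)])
      if kb.1.2 ≠ kb.1.1 then d1.modify kb.1.2 [] (fun l => l ++ [(kb.2 : Int)]) else d1)
    PySem.Dict.empty with hidx
  have hkeysnd : idx.keys.Nodup := pv_nodup_keys _ _ PySem.Dict.nodup_keys_empty
  have hgocc : ∀ x : Int, idx.getD x [] = pvOcc bl x := by
    intro x; rw [hidx]; exact pv_getD_occ bl x
  have hval : ∀ ks ∈ idx.values, ∃ x : Int, ks = pvOcc bl x := by
    intro ks hks
    rcases List.mem_map.1 hks with ⟨⟨x, v⟩, hmem, rfl⟩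
    refine ⟨x, ?_⟩
    rw [← hgocc x]
    exact (PySem.Dict.getD_of_mem_items idx hmem hkeysnd []).symm
  have hoccv : ∀ x : Int, pvOcc bl x ≠ [] → pvOcc bl x ∈ idx.values := by
    intro x hne
    have hc : idx.contains x = true := by
      by_contra hc
      have hcf : idx.contains x = false := by revert hc; cases idx.contains x <;> simp
      exact hne (by rw [← hgocc x]; exact PySem.Dict.getD_of_not_contains idx [] hcf)
    obtain ⟨v, hv⟩ : ∃ v, idx.get? x = some v := by
      have h2 := PySem.Dict.contains_eq_isSome_get? idx x
      rw [hc] at h2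
      exact Option.isSome_iff_exists.1 h2.symm
    have hgd : idx.getD x [] = v := by rw [PySem.Dict.getD_eq_get?_getD, hv]; rfl
    have hitems : (x, v) ∈ idx.items := PySem.Dict.mem_items_of_get?_eq_some idx hv
    rw [← hgocc x, hgd]
    exact List.mem_map_of_mem hitems
  apply pv_sorted2_eq
  · -- the pair set and the lexicographic pair list have the same (distinct) members
    have hnd : (idx.values.foldl (fun s ks =>
        (PySem.List.pyRange 0 (PySem.List.len ks) 1).foldl (fun s p =>
          (PySem.List.pyRange (p + 1) (PySem.List.len ks) 1).foldl (fun s q =>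
            PySem.Set.add s (PySem.List.pyGetD ks p 0, PySem.List.pyGetD ks q 0)) s) s)
        PySem.Set.empty).Nodup :=
      pv_foldl_pres (fun s : PySem.Set (Int × Int) => s.Nodup) _
        (fun s ks hs =>
          pv_foldl_pres (fun s : PySem.Set (Int × Int) => s.Nodup) _
            (fun s2 p hs2 =>
              pv_foldl_pres (fun s : PySem.Set (Int × Int) => s.Nodup) _
                (fun s3 q hs3 => PySem.Set.nodup_add _ _ hs3) _ s2 hs2) _ s hs)
        idx.values PySem.Set.empty List.nodup_nil
    rw [List.perm_ext_iff_of_nodup (pv_LP_nodup bl) hnd]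
    intro pr
    obtain ⟨i, j⟩ := pr
    rw [pv_mem_LP, pv_mem_pairs]
    simp only [show (PySem.Set.empty : PySem.Set (Int × Int)) = [] from rfl,
      List.not_mem_nil, false_or]
    constructor
    · rintro ⟨hi0, hij, hjn, hs⟩
      have hi' : i = ((i.toNat : Nat) : Int) := (Int.toNat_of_nonneg hi0).symm
      have hj' : j = ((j.toNat : Nat) : Int) := (Int.toNat_of_nonneg (by omega)).symm
      have hkin : i.toNat < bl.length := by omega
      have hkjn : j.toNat < bl.length := by omega
      rw [pvShare, hi', hj', PySem.List.pyGetD_natCast, PySem.List.pyGetD_natCast] at hs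
      obtain ⟨x, hx1, hx2⟩ : ∃ x : Int, pvHas bl x i.toNat = true ∧ pvHas bl x j.toNat = true := by
        have hb : ((((bl.getD i.toNat (0, 0)).1 = (bl.getD j.toNat (0, 0)).1)
            ∨ ((bl.getD i.toNat (0, 0)).1 = (bl.getD j.toNat (0, 0)).2))
            ∨ ((bl.getD i.toNat (0, 0)).2 = (bl.getD j.toNat (0, 0)).1))
            ∨ ((bl.getD i.toNat (0, 0)).2 = (bl.getD j.toNat (0, 0)).2) := by
          simpa only [Bool.or_eq_true, beq_iff_eq] using hs
        clear hs
        rcases hb with ((h | h) | h) | h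
        · exact ⟨(bl.getD i.toNat (0, 0)).1, by unfold pvHas; simp,
            by unfold pvHas; rw [h]; simp⟩
        · exact ⟨(bl.getD i.toNat (0, 0)).1, by unfold pvHas; simp,
            by unfold pvHas; rw [h]; simp⟩
        · exact ⟨(bl.getD i.toNat (0, 0)).2, by unfold pvHas; simp,
            by unfold pvHas; rw [h]; simp⟩
        · exact ⟨(bl.getD i.toNat (0, 0)).2, by unfold pvHas; simp,
            by unfold pvHas; rw [h]; simp⟩
      have hi_mem : i ∈ pvOcc bl x := (pv_mem_occ bl x i).2 ⟨i.toNat, hkin, hx1, hi'⟩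
      have hj_mem : j ∈ pvOcc bl x := (pv_mem_occ bl x j).2 ⟨j.toNat, hkjn, hx2, hj'⟩
      obtain ⟨pn, hpn, hpe⟩ := List.getElem_of_mem hi_mem
      obtain ⟨qn, hqn, hqe⟩ := List.getElem_of_mem hj_mem
      have hmono := List.pairwise_iff_getElem.1 (pv_occ_pairwise bl x)
      have hpq : pn < qn := by
        rcases lt_trichotomy pn qn with h | h | h
        · exact h
        · exfalso
          subst h
          have : i = j := hpe.symm.trans hqe
          omega
        · exfalso; have := hmono qn pn hqn hpn h; rw [hpe, hqe] at this; omega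
      refine ⟨pvOcc bl x, hoccv x (List.ne_nil_of_mem hi_mem), (pn : Int), ?_, (qn : Int), ?_, ?_⟩
      · rw [PySem.List.mem_pyRange_one, PySem.List.len_eq]
        exact ⟨Int.natCast_nonneg pn, by exact_mod_cast hpn⟩
      · rw [PySem.List.mem_pyRange_one, PySem.List.len_eq]
        constructor
        · exact_mod_cast hpq
        · exact_mod_cast hqn
      · rw [PySem.List.pyGetD_natCast, PySem.List.pyGetD_natCast,
          List.getD_eq_getElem _ _ hpn, List.getD_eq_getElem _ _ hqn, hpe, hqe]
    · rintro ⟨ks, hks, p, hp, q, hq, heq⟩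
      obtain ⟨x, rfl⟩ := hval ks hks
      rw [PySem.List.mem_pyRange_one, PySem.List.len_eq] at hp hq
      obtain ⟨hp0, hplen⟩ := hp
      obtain ⟨hq1, hqlen⟩ := hq
      have hpn : p.toNat < (pvOcc bl x).length := by omega
      have hqn : q.toNat < (pvOcc bl x).length := by omega
      rw [PySem.List.pyGetD_eq_getElem _ _ hp0 hplen,
        PySem.List.pyGetD_eq_getElem _ _ (by omega) hqlen] at heq
      have hij1 : i = (pvOcc bl x)[p.toNat] := congrArg Prod.fst heq
      have hij2 : j = (pvOcc bl x)[q.toNat] := congrArg Prod.snd heq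
      have hmono := List.pairwise_iff_getElem.1 (pv_occ_pairwise bl x)
      have hlt : i < j := by
        have h2 := hmono p.toNat q.toNat hpn hqn (by omega)
        rw [hij1, hij2]
        exact h2
      have hi_mem : i ∈ pvOcc bl x := hij1 ▸ List.getElem_mem hpn
      have hj_mem : j ∈ pvOcc bl x := hij2 ▸ List.getElem_mem hqn
      obtain ⟨k1, hk1, hhas1, hieq⟩ := (pv_mem_occ bl x i).1 hi_mem
      obtain ⟨k2, hk2, hhas2, hjeq⟩ := (pv_mem_occ bl x j).1 hj_mem
      refine ⟨by rw [hieq]; exact Int.natCast_nonneg k1, hlt, by rw [hjeq]; exact_mod_cast hk2, ?_⟩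
      rw [pvShare, hieq, hjeq, PySem.List.pyGetD_natCast, PySem.List.pyGetD_natCast]
      simp only [pvHas, Bool.or_eq_true, beq_iff_eq] at hhas1 hhas2 ⊢
      rcases hhas1 with h1 | h1 <;> rcases hhas2 with h2 | h2 <;> omega
  · exact pv_LP_pairwise bl

-- ===== VERDICT (by name: the statement is the Claim_ definition above) =====
theorem get_alist_spec : Claim_equal_get_alist := by
  intro mol blist _
  show get_alist mol blist = get_alist_alt mol blist
  unfold get_alist get_alist_alt
  simp only []
  set bl := PySem.List.sorted2 blist (fun b => b.1) (fun b => b.2) false with hbl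
  rw [pv_A_char bl, pv_B_pairs bl]
  unfold pvPure
  rw [pv_dedup ((pvLP bl).map (pvTf bl)) [] PySem.Set.empty (by simp [PySem.Set.empty])]
  rw [List.foldl_map]
  rfl
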